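-- pv_equiv track=rewrite | github.com/marceloprates/Ethics-AI-Data | Code/search_csv.py | check
-- ===== SOURCE A (Python) =====
-- def check( text, kws ):
--     qty = 0
--     for kw in kws:
--         has = True
--         for k in kw:
--             if k not in text:
--                 has = False
--                 break
--             #end if
--         #end for
--         if has:
--             qty += 1
--         #end if
--     return qty
-- ===== SOURCE B (Python) =====
-- def check(text, kws):
--     # index the text once: the set of all substrings of text whose length is
--     # the length of some (non-empty) keyword; then every keyword test is a set lookup
--     lengths = {len(k) for group in kws for k in group if k}
--     subs = set()
--     for ell in lengths:
--         subs.update(text[i:i + ell] for i in range(len(text) - ell + 1))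
--     return sum(1 for group in kws if all(k == "" or k in subs for k in group))
-- ===== Notes on version B (the rewrite author's own statement) =====
-- stated objective: alternative
-- what changed: B indexes the text once -- it builds the set of all substrings of text whose length is some keyword's length -- so every keyword test becomes a hash-set lookup and A's per-keyword scan of the text disappears; groups are then counted in one lookup-only pass.
import Mathlib
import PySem

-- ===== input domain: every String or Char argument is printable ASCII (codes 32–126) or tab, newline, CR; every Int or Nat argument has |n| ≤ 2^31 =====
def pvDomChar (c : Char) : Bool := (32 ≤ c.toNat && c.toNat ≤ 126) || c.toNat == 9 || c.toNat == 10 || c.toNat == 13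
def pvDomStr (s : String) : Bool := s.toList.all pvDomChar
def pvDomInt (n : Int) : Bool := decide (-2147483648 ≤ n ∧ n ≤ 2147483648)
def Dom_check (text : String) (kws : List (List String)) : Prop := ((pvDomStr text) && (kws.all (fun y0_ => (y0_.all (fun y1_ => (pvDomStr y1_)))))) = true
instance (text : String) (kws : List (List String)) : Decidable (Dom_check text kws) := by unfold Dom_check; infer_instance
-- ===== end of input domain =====

-- B indexes the text once (the set of all substrings of text of each keyword length),
-- turning every keyword test into a set lookup instead of A's per-keyword text scan
-- (objective: alternative).


-- ===== PORT A =====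
-- inner 'for k in kw: if k not in text: has = False; break' as structural recursion
def checkHas (text : String) : List String → Bool
  | [] => true
  | k :: rest => if PySem.Str.isIn k text then checkHas text rest else false

def check (text : String) (kws : List (List String)) : Int :=
  kws.foldl (fun qty kw => if checkHas text kw then qty + 1 else qty) 0

-- ===== PORT B =====
-- '{len(k) for group in kws for k in group if k}': set of non-empty keyword lengths
def kwLengths (kws : List (List String)) : PySem.Set Int :=
  kws.foldl
    (fun s group =>
      group.foldl (fun s k => if k ≠ "" then PySem.Set.add s (PySem.Str.len k) else s) s)
    PySem.Set.empty

-- 'for ell in lengths: subs.update(text[i:i+ell] for i in range(len(text)-ell+1))'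
def subsSet (text : String) (kws : List (List String)) : PySem.Set String :=
  (kwLengths kws).foldl
    (fun s ell =>
      (PySem.List.pyRange 0 (PySem.Str.len text - ell + 1)).foldl
        (fun s i => PySem.Set.add s (PySem.Str.slice text (some i) (some (i + ell)))) s)
    PySem.Set.empty

-- 'sum(1 for group in kws if all(k == "" or k in subs for k in group))'
def check_alt (text : String) (kws : List (List String)) : Int :=
  kws.foldl
    (fun qty group =>
      if group.all (fun k => k == "" || PySem.Set.contains (subsSet text kws) k)
      then qty + 1 else qty) 0

-- ===== PRECONDITION & SPEC =====
def Spec_check (text : String) (kws : List (List String)) (out : Int) : Prop := out = check_alt text kws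
instance (text : String) (kws : List (List String)) (out : Int) : Decidable (Spec_check text kws out) := by unfold Spec_check; infer_instance

-- ===== CLAIM (what is proved, stated in full; the proofs are below) =====
def Claim_equal_check : Prop := ∀ (text : String) (kws : List (List String)), Dom_check text kws → Spec_check text kws (check text kws)

-- ===== LEMMAS AND PROOFS =====

theorem checkHas_iff (text : String) (g : List String) :
    checkHas text g = true ↔ ∀ k ∈ g, PySem.Str.isIn k text = true := by
  induction g with
  | nil => simp [checkHas]
  | cons k rest ih =>
      simp only [checkHas, List.mem_cons]
      by_cases hk : PySem.Str.isIn k text = true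
      · rw [if_pos hk, ih]
        constructor
        · rintro h k' hk'
          rcases hk' with rfl | hk'
          · exact hk
          · exact h k' hk'
        · intro h k' hk'; exact h k' (Or.inr hk')
      · rw [if_neg hk]
        simp only [Bool.false_eq_true, false_iff]
        intro h
        exact hk (h k (Or.inl rfl))

theorem mem_len_inner (group : List String) :
    ∀ (s : PySem.Set Int) (x : Int),
      x ∈ group.foldl (fun s k => if k ≠ "" then PySem.Set.add s (PySem.Str.len k) else s) s
      ↔ x ∈ s ∨ ∃ k ∈ group, k ≠ "" ∧ PySem.Str.len k = x := by
  induction group with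
  | nil => intro s x; simp
  | cons k rest ih =>
      intro s x
      simp only [List.foldl_cons, List.mem_cons]
      by_cases hk : k = ""
      · rw [if_neg (by simp [hk]), ih]
        constructor
        · rintro (h | ⟨k', h1, h2⟩)
          · exact Or.inl h
          · exact Or.inr ⟨k', Or.inr h1, h2⟩
        · rintro (h | ⟨k', (rfl | h1), h2⟩)
          · exact Or.inl h
          · exact absurd hk h2.1
          · exact Or.inr ⟨k', h1, h2⟩
      · rw [if_pos (by simp [hk]), ih]
        simp only [PySem.Set.mem_add]
        constructor
        · rintro ((h | h) | ⟨k', h1, h2⟩)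
          · exact Or.inl h
          · exact Or.inr ⟨k, Or.inl rfl, hk, h.symm⟩
          · exact Or.inr ⟨k', Or.inr h1, h2⟩
        · rintro (h | ⟨k', (rfl | h1), h2, h3⟩)
          · exact Or.inl (Or.inl h)
          · exact Or.inl (Or.inr h3.symm)
          · exact Or.inr ⟨k', h1, h2, h3⟩

theorem mem_kwLengths (kws : List (List String)) (x : Int) :
    x ∈ kwLengths kws ↔ ∃ g ∈ kws, ∃ k ∈ g, k ≠ "" ∧ PySem.Str.len k = x := by
  unfold kwLengths
  suffices h : ∀ (s : PySem.Set Int),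
      x ∈ kws.foldl
        (fun s group =>
          group.foldl (fun s k => if k ≠ "" then PySem.Set.add s (PySem.Str.len k) else s) s) s
      ↔ x ∈ s ∨ ∃ g ∈ kws, ∃ k ∈ g, k ≠ "" ∧ PySem.Str.len k = x by
    simpa [PySem.Set.empty] using h PySem.Set.empty
  induction kws with
  | nil => intro s; simp
  | cons g rest ih =>
      intro s
      simp only [List.foldl_cons, ih, mem_len_inner, List.mem_cons]
      constructor
      · rintro ((h | ⟨k, h1, h2⟩) | ⟨g', hg', hx⟩)
        · exact Or.inl h
        · exact Or.inr ⟨g, Or.inl rfl, k, h1, h2⟩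
        · exact Or.inr ⟨g', Or.inr hg', hx⟩
      · rintro (h | ⟨g', (rfl | hg'), hx⟩)
        · exact Or.inl (Or.inl h)
        · exact Or.inl (Or.inr hx)
        · exact Or.inr ⟨g', hg', hx⟩

theorem mem_subs_inner (text : String) (ell : Int) :
    ∀ (s : PySem.Set String) (x : String),
      x ∈ (PySem.List.pyRange 0 (PySem.Str.len text - ell + 1)).foldl
        (fun s i => PySem.Set.add s (PySem.Str.slice text (some i) (some (i + ell)))) s
      ↔ x ∈ s ∨ ∃ i : Int, 0 ≤ i ∧ i < PySem.Str.len text - ell + 1 ∧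
          x = PySem.Str.slice text (some i) (some (i + ell)) := by
  intro s x
  constructor
  · -- generalize over the range list, remembering its members lie in the range
    suffices h : ∀ (l : List Int),
        (∀ i ∈ l, 0 ≤ i ∧ i < PySem.Str.len text - ell + 1) → ∀ (s : PySem.Set String),
        x ∈ l.foldl (fun s i => PySem.Set.add s (PySem.Str.slice text (some i) (some (i + ell)))) s
        → x ∈ s ∨ ∃ i : Int, 0 ≤ i ∧ i < PySem.Str.len text - ell + 1 ∧
            x = PySem.Str.slice text (some i) (some (i + ell)) by
      exact h _ (fun i hi => PySem.List.mem_pyRange_one.mp hi) s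
    intro l
    induction l with
    | nil => intro _ s h; exact Or.inl h
    | cons i rest ih =>
        intro hmem s h
        rcases ih (fun j hj => hmem j (List.mem_cons_of_mem _ hj)) _ h with h' | h'
        · rw [PySem.Set.mem_add] at h'
          rcases h' with h' | rfl
          · exact Or.inl h'
          · obtain ⟨h0, h1⟩ := hmem i (List.mem_cons_self ..)
            exact Or.inr ⟨i, h0, h1, rfl⟩
        · exact Or.inr h'
  · rintro (h | ⟨i, h0, h1, rfl⟩)
    · -- the initial set is preserved by the fold
      suffices hpres : ∀ (l : List Int) (s : PySem.Set String), x ∈ s →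
          x ∈ l.foldl (fun s i => PySem.Set.add s (PySem.Str.slice text (some i) (some (i + ell)))) s by
        exact hpres _ s h
      intro l
      induction l with
      | nil => intro s h; exact h
      | cons j rest ih =>
          intro s h
          exact ih _ ((PySem.Set.mem_add _ _ _).mpr (Or.inl h))
    · -- an element of the range ends up in the fold's result
      have hi : i ∈ PySem.List.pyRange 0 (PySem.Str.len text - ell + 1) :=
        PySem.List.mem_pyRange_one.mpr ⟨h0, h1⟩
      suffices hins : ∀ (l : List Int) (s : PySem.Set String), i ∈ l →
          PySem.Str.slice text (some i) (some (i + ell))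
            ∈ l.foldl (fun s i => PySem.Set.add s (PySem.Str.slice text (some i) (some (i + ell)))) s by
        exact hins _ s hi
      intro l
      induction l with
      | nil => intro s h; cases h
      | cons j rest ih =>
          intro s h
          rcases List.mem_cons.mp h with rfl | h
          · -- preserved through the rest of the fold
            have hpres : ∀ (l : List Int) (s : PySem.Set String) (y : String), y ∈ s →
                y ∈ l.foldl (fun s i => PySem.Set.add s (PySem.Str.slice text (some i) (some (i + ell)))) s := by
              intro l
              induction l with
              | nil => intro s y h; exact h
              | cons j' rest' ih' =>
                  intro s y h
                  exact ih' _ _ ((PySem.Set.mem_add _ _ _).mpr (Or.inl h))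
            exact hpres rest (PySem.Set.add s _) _ ((PySem.Set.mem_add _ _ _).mpr (Or.inr rfl))
          · exact ih _ h

theorem mem_subsSet (text : String) (kws : List (List String)) (x : String) :
    x ∈ subsSet text kws ↔ ∃ ell ∈ kwLengths kws, ∃ i : Int,
      0 ≤ i ∧ i < PySem.Str.len text - ell + 1 ∧
      x = PySem.Str.slice text (some i) (some (i + ell)) := by
  unfold subsSet
  suffices h : ∀ (L : List Int) (s : PySem.Set String),
      x ∈ L.foldl
        (fun s ell =>
          (PySem.List.pyRange 0 (PySem.Str.len text - ell + 1)).foldl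
            (fun s i => PySem.Set.add s (PySem.Str.slice text (some i) (some (i + ell)))) s) s
      ↔ x ∈ s ∨ ∃ ell ∈ L, ∃ i : Int,
          0 ≤ i ∧ i < PySem.Str.len text - ell + 1 ∧
          x = PySem.Str.slice text (some i) (some (i + ell)) by
    simpa [PySem.Set.empty] using h (kwLengths kws) PySem.Set.empty
  intro L
  induction L with
  | nil => intro s; simp
  | cons ell rest ih =>
      intro s
      simp only [List.foldl_cons, ih, mem_subs_inner, List.mem_cons]
      constructor
      · rintro ((h | ⟨i, h0, h1, h2⟩) | ⟨e, he, hx⟩)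
        · exact Or.inl h
        · exact Or.inr ⟨ell, Or.inl rfl, i, h0, h1, h2⟩
        · exact Or.inr ⟨e, Or.inr he, hx⟩
      · rintro (h | ⟨e, (rfl | he), hx⟩)
        · exact Or.inl (Or.inl h)
        · exact Or.inl (Or.inr hx)
        · exact Or.inr ⟨e, he, hx⟩

-- every stored slice is an infix of the text
theorem subs_sound (text : String) (kws : List (List String)) (x : String)
    (hx : x ∈ subsSet text kws) : PySem.Str.isIn x text = true := by
  rw [mem_subsSet] at hx
  obtain ⟨ell, hell, i, h0, _, rfl⟩ := hx
  have hell0 : 0 ≤ ell := by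
    rw [mem_kwLengths] at hell
    obtain ⟨g, _, k, _, _, rfl⟩ := hell
    simp [PySem.Str.len]
  have hb : (0 : Int) ≤ i + ell := by omega
  rw [PySem.Str.isIn_iff_infix, PySem.Str.toList_slice,
    PySem.Chars.slice_eq_listSlice, PySem.List.slice_toNat text.toList h0 hb]
  exact ((List.take_prefix _ _).isInfix).trans ((List.drop_suffix _ _).isInfix)

-- a non-empty keyword occurring as an infix is one of the stored slices
theorem subs_complete (text : String) (kws : List (List String)) (k : String)
    (_hk : k ≠ "") (hlen : PySem.Str.len k ∈ kwLengths kws)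
    (hin : PySem.Str.isIn k text = true) : k ∈ subsSet text kws := by
  rw [PySem.Str.isIn_iff_infix] at hin
  obtain ⟨pre, suf, hsplit⟩ := hin
  rw [mem_subsSet]
  refine ⟨PySem.Str.len k, hlen, (pre.length : Int), by positivity, ?_, ?_⟩
  · have : pre.length + k.toList.length ≤ text.toList.length := by
      rw [← hsplit]; simp
    simp only [PySem.Str.len]
    omega
  · apply String.toList_inj.mp
    have hstr : PySem.Str.len k = (k.toList.length : Int) := by simp [PySem.Str.len]
    have hl : (0 : Int) ≤ (pre.length : Int) := by positivity
    have hb : (0 : Int) ≤ (pre.length : Int) + PySem.Str.len k := by rw [hstr]; positivity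
    rw [PySem.Str.toList_slice, PySem.Chars.slice_eq_listSlice,
      PySem.List.slice_toNat text.toList hl hb]
    have hlenk : ((pre.length : Int) + PySem.Str.len k).toNat - ((pre.length : Int)).toNat
        = k.toList.length := by
      rw [hstr]; omega
    rw [hlenk, Int.toNat_natCast, ← hsplit, List.append_assoc, List.drop_left, List.take_left]

-- for a keyword that occurs in kws, B's lookup agrees with Python's 'k in text'
theorem present_eq (text : String) (kws : List (List String)) (g : List String)
    (hg : g ∈ kws) (k : String) (hk : k ∈ g) :
    (k == "" || PySem.Set.contains (subsSet text kws) k) = PySem.Str.isIn k text := by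
  by_cases hke : k = ""
  · subst hke
    simp [PySem.Str.isIn, PySem.Chars.isIn_nil]
  · have hlen : PySem.Str.len k ∈ kwLengths kws :=
      (mem_kwLengths kws _).mpr ⟨g, hg, k, hk, hke, rfl⟩
    have hne : (k == "") = false := by simp [hke]
    rw [hne, Bool.false_or]
    cases hin : PySem.Str.isIn k text with
    | true =>
        exact List.contains_iff_mem.mpr (subs_complete text kws k hke hlen hin)
    | false =>
        cases hc : PySem.Set.contains (subsSet text kws) k with
        | false => rfl
        | true =>
            have := subs_sound text kws k (List.contains_iff_mem.mp hc)
            rw [this] at hin; cases hin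

theorem all_eq_checkHas (text : String) (kws : List (List String)) (g : List String)
    (hg : g ∈ kws) :
    g.all (fun k => k == "" || PySem.Set.contains (subsSet text kws) k) = checkHas text g := by
  cases h : checkHas text g with
  | true =>
      rw [List.all_eq_true]
      intro k hk
      rw [present_eq text kws g hg k hk]
      exact (checkHas_iff text g).mp h k hk
  | false =>
      cases ha : g.all (fun k => k == "" || PySem.Set.contains (subsSet text kws) k) with
      | false => rfl
      | true =>
          exfalso
          have : checkHas text g = true := by
            rw [checkHas_iff]
            intro k hk
            rw [← present_eq text kws g hg k hk]
            exact List.all_eq_true.mp ha k hk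
          rw [this] at h; cases h

theorem fold_congr (text : String) (kws : List (List String)) :
    ∀ (l : List (List String)), (∀ g ∈ l, g ∈ kws) → ∀ (a : Int),
      l.foldl
        (fun qty group =>
          if group.all (fun k => k == "" || PySem.Set.contains (subsSet text kws) k)
          then qty + 1 else qty) a
      = l.foldl (fun qty kw => if checkHas text kw then qty + 1 else qty) a := by
  intro l
  induction l with
  | nil => intro _ a; rfl
  | cons g rest ih =>
      intro hmem a
      rw [List.foldl_cons, List.foldl_cons, all_eq_checkHas text kws g (hmem g (List.mem_cons_self ..))]
      exact ih (fun g' h => hmem g' (List.mem_cons_of_mem _ h)) _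

-- ===== VERDICT (by name: the statement is the Claim_ definition above) =====
theorem check_spec : Claim_equal_check := by
  intro text kws _
  unfold Spec_check check check_alt
  exact (fold_congr text kws kws (fun g h => h) 0).symm
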